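-- pv_equiv track=rewrite | github.com/cortado-tool/cortado-core | cortado_core/eventually_follows_pattern_mining/local_process_models/discovery/sequentialize_pattern.py | __sequential_combination
-- ===== SOURCE A (Python) =====
-- import itertools
-- from typing import List
--
-- def __sequential_combination(elements: List[List[List[str]]]):
--     combined_c_sequentializations = itertools.product(*elements)
--
--     traces = []
--     for tup in combined_c_sequentializations:
--         trace = []
--         for elem in tup:
--             trace += elem
--         traces.append(trace)
--
--     return traces
-- ===== SOURCE B (Python) =====
-- def __sequential_combination(elements):
--     traces = [[]]
--     for group in elements:
--         traces = [partial + elem for partial in traces for elem in group]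
--     return traces
-- ===== Notes on version B (the rewrite author's own statement) =====
-- stated objective: alternative
-- what changed: Replaces itertools.product followed by a per-tuple concatenation loop with an incremental fold that extends partial traces group by group, never materializing tuples.
import Mathlib
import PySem

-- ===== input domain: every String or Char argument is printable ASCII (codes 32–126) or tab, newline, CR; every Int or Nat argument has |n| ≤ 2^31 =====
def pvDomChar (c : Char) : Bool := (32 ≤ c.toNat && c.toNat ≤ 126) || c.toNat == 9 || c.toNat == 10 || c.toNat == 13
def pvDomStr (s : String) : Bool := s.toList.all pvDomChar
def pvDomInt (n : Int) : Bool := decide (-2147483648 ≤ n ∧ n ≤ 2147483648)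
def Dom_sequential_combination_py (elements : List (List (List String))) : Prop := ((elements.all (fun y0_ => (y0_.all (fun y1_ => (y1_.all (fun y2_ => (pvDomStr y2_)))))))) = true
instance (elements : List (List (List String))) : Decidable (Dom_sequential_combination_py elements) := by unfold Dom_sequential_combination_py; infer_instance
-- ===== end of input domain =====

-- B replaces itertools.product + per-tuple concatenation with an incremental fold over groups (alternative decomposition, same output).
-- ===== PORT A =====
-- itertools.product(*elements), rightmost group varying fastest
def pvProduct (elements : List (List (List String))) : List (List (List String)) :=
  match elements with
  | [] => [[]]
  | g :: gs => g.flatMap (fun e => (pvProduct gs).map (fun t => e :: t))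

def sequential_combination_py (elements : List (List (List String))) : List (List String) :=
  -- traces = []; for tup in …: trace = []; for elem in tup: trace += elem; traces.append(trace)
  (pvProduct elements).foldl (fun traces tup => traces ++ [tup.foldl (fun trace elem => trace ++ elem) []]) []

-- ===== PORT B =====
def sequential_combination_py_alt (elements : List (List (List String))) : List (List String) :=
  elements.foldl (fun traces group => traces.flatMap (fun partial_ => group.map (fun elem => partial_ ++ elem))) [[]]

-- ===== PRECONDITION & SPEC =====
def Spec_sequential_combination_py (elements : List (List (List String))) (out : List (List String)) : Prop := out = sequential_combination_py_alt elements
instance (elements : List (List (List String))) (out : List (List String)) : Decidable (Spec_sequential_combination_py elements out) := by unfold Spec_sequential_combination_py; infer_instance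

-- ===== CLAIM (what is proved, stated in full; the proofs are below) =====
def Claim_equal_sequential_combination_py : Prop := ∀ (elements : List (List (List String))), Dom_sequential_combination_py elements → Spec_sequential_combination_py elements (sequential_combination_py elements)

-- ===== LEMMAS AND PROOFS =====


-- A's outer loop appends one concatenated trace per tuple: it is a map over the product.
theorem pvA_foldl_map (ts : List (List (List String))) (acc : List (List String)) :
    ts.foldl (fun traces tup => traces ++ [tup.foldl (fun trace elem => trace ++ elem) []]) acc
      = acc ++ ts.map (fun tup => tup.foldl (fun trace elem => trace ++ elem) []) := by
  induction ts generalizing acc with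
  | nil => simp
  | cons t ts ih => simp [List.foldl, ih]

theorem pvConcat_foldl (t : List (List String)) (a : List String) :
    t.foldl (fun trace elem => trace ++ elem) a = a ++ t.foldl (fun trace elem => trace ++ elem) [] := by
  induction t generalizing a with
  | nil => simp
  | cons e t ih => rw [List.foldl, List.foldl, ih ([] ++ e), ih (a ++ e)]; simp

-- Loop invariant for B's fold: it equals every partial trace prefixed to every concatenated tuple of the remaining product.
theorem pvB_invariant (gs : List (List (List String))) (acc : List (List String)) :
    gs.foldl (fun traces group => traces.flatMap (fun partial_ => group.map (fun elem => partial_ ++ elem))) acc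
      = acc.flatMap (fun p => (pvProduct gs).map (fun tup => p ++ tup.foldl (fun trace elem => trace ++ elem) [])) := by
  induction gs generalizing acc with
  | nil => simp [pvProduct]
  | cons g gs ih =>
    rw [List.foldl, ih]
    simp only [pvProduct, List.flatMap_assoc, List.map_flatMap, List.flatMap_map, List.map_map]
    congr 1; funext p; congr 1; funext e
    congr 1; funext tup
    simp [pvConcat_foldl tup e, List.append_assoc]

-- ===== VERDICT (by name: the statement is the Claim_ definition above) =====
theorem sequential_combination_py_spec : Claim_equal_sequential_combination_py := by
  intro elements _
  unfold Spec_sequential_combination_py sequential_combination_py sequential_combination_py_alt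
  rw [pvA_foldl_map, pvB_invariant]
  simp
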